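-- pv_equiv track=rewrite | github.com/sahilcmd3/DSA-Questions | Leetcode/HashMap/Contains_Duplicate_2.py | near_dup
-- ===== SOURCE A (Python) =====
-- def near_dup(nums, k):
--     visited = {}
--
--     # built-in function that adds a counter to an iterable and returns it as an enumerate object.
--     for i, val in enumerate(nums):
--         # This is especially useful when you need both the index and the value while looping through a list, tuple, or other iterable.
--         if val in visited and i - visited[val] <= k:
--             return True
--         else:
--             visited[val] = i
--
--     return False
-- ===== SOURCE B (Python) =====
-- def near_dup(nums, k):
--     # Sliding-window set of the last k values; a window of non-positive
--     # size can never contain anything, so answer False immediately.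
--     if k < 1:
--         return False
--     window = set()
--     for i, val in enumerate(nums):
--         if i > k:
--             window.discard(nums[i - k - 1])
--         if val in window:
--             return True
--         window.add(val)
--     return False
-- ===== Notes on version B (the rewrite author's own statement) =====
-- stated objective: idiomatic
-- what changed: Replaced the value-to-last-index dict with a sliding-window set of the last k values, evicting nums[i-k-1] as it leaves the window (with an immediate False for k<1, where no window exists); the dict and its index arithmetic disappear.
import Mathlib
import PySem

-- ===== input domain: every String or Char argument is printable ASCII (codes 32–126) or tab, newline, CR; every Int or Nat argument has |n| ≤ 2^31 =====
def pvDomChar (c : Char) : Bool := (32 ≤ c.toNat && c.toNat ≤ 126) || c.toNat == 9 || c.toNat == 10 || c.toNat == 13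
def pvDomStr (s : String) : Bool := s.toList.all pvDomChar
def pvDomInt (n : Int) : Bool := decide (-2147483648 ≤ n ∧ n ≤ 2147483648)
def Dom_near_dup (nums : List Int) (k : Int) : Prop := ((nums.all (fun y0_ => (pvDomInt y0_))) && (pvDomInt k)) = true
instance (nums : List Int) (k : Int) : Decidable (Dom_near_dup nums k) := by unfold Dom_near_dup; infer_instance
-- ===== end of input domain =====

-- B replaces A's value→last-index dict by a sliding-window set of the last k values, evicting the
-- value that leaves the window each step (idiomatic; return value only, neither program mutates its input).

-- ===== PORT A =====
-- loop 'for i, val in enumerate(nums)' with early return, over the dict 'visited'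
def near_dup_go (k : Int) : List (Int × Int) → PySem.Dict Int Int → Bool
  | [], _ => false
  | (i, v) :: rest, visited =>
    match visited.get? v with
    | some j => if i - j ≤ k then true else near_dup_go k rest (visited.insert v i)
    | none => near_dup_go k rest (visited.insert v i)

def near_dup (nums : List Int) (k : Int) : Bool :=
  near_dup_go k (PySem.List.enumerate nums) PySem.Dict.empty

-- ===== PORT B =====
-- the body of 'if i > k: window.discard(nums[i - k - 1])'; the index is in range whenever the
-- branch is taken (1 ≤ k < i ≤ len(nums)), so the 'none' branch of pyGet? is unreachable
def pvEvict (nums : List Int) (k i : Int) (window : PySem.Set Int) : PySem.Set Int :=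
  if k < i then
    match PySem.List.pyGet? nums (i - k - 1) with
    | some x => window.discard x
    | none => window
  else window

-- loop 'for i, val in enumerate(nums)' over the set 'window'
def near_dup_alt_go (nums : List Int) (k : Int) : List (Int × Int) → PySem.Set Int → Bool
  | [], _ => false
  | (i, v) :: rest, window =>
    if (pvEvict nums k i window).contains v then true
    else near_dup_alt_go nums k rest ((pvEvict nums k i window).add v)

def near_dup_alt (nums : List Int) (k : Int) : Bool :=
  if k < 1 then false
  else near_dup_alt_go nums k (PySem.List.enumerate nums) PySem.Set.empty

-- ===== PRECONDITION & SPEC =====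
def Spec_near_dup (nums : List Int) (k : Int) (out : Bool) : Prop := out = near_dup_alt nums k
instance (nums : List Int) (k : Int) (out : Bool) : Decidable (Spec_near_dup nums k out) := by unfold Spec_near_dup; infer_instance

-- ===== CLAIM (what is proved, stated in full; the proofs are below) =====
def Claim_equal_near_dup : Prop := ∀ (nums : List Int) (k : Int), Dom_near_dup nums k → Spec_near_dup nums k (near_dup nums k)

-- ===== LEMMAS AND PROOFS =====

-- For k < 1, A's test 'i - visited[val] <= k' can never fire, since stored indices are < i.
lemma near_dup_go_false_of_lt_one (k : Int) (hk : k < 1) :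
    ∀ (l : List Int) (s : Int) (visited : PySem.Dict Int Int),
      (∀ v j, visited.get? v = some j → j < s) →
      near_dup_go k (PySem.List.enumerate l s) visited = false := by
  intro l
  induction l with
  | nil => intro s visited _; simp [PySem.List.enumerate, near_dup_go]
  | cons x l ih =>
    intro s visited hv
    rw [PySem.List.enumerate_cons]
    unfold near_dup_go
    have hins : ∀ v j, (visited.insert x s).get? v = some j → j < s + 1 := by
      intro v j hj
      rcases eq_or_ne v x with rfl | hne
      · rw [PySem.Dict.get?_insert_self] at hj
        injection hj with hj; omega
      · rw [PySem.Dict.get?_insert_of_ne _ _ hne] at hj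
        have := hv v j hj; omega
    split
    · next j heq =>
      have := hv x j heq
      rw [if_neg (by omega)]
      exact ih (s + 1) _ hins
    · exact ih (s + 1) _ hins

-- every element of a list has a LAST occurrence
lemma exists_last_occ (pre : List Int) (x : Int) :
    x ∈ pre → ∃ jn, ∃ _ : jn < pre.length, pre[jn] = x ∧
      ∀ j' (h' : j' < pre.length), jn < j' → pre[j'] ≠ x := by
  induction pre using List.reverseRecOn with
  | nil => intro h; simp at h
  | append_singleton ys y ih =>
    intro hmem
    rcases eq_or_ne y x with rfl | hne
    · refine ⟨ys.length, by simp, ?_, ?_⟩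
      · rw [List.getElem_append_right (le_refl _)]; simp
      · intro j' h' hgt; simp at h'; omega
    · have hx : x ∈ ys := by
        rcases List.mem_append.mp hmem with h | h
        · exact h
        · simp at h; exact absurd h.symm hne
      obtain ⟨jn, hl, hxe, hlast⟩ := ih hx
      refine ⟨jn, by simp; omega, ?_, ?_⟩
      · rw [List.getElem_append_left hl]; exact hxe
      · intro j' h' hgt
        simp at h'
        rcases Nat.lt_or_ge j' ys.length with h2 | h2
        · rw [List.getElem_append_left h2]; exact hlast j' h2 hgt
        · have : j' = ys.length := by omega
          subst this
          rw [List.getElem_append_right (le_refl _)]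
          simpa using hne

-- visited is the last-occurrence dict of the processed prefix 'pre'
def VisInv (pre : List Int) (visited : PySem.Dict Int Int) : Prop :=
  ∀ v j, visited.get? v = some j ↔
    ∃ jn : Nat, j = (jn : Int) ∧ ∃ _ : jn < pre.length,
      pre[jn] = v ∧ ∀ j' (h' : j' < pre.length), jn < j' → pre[j'] ≠ v

-- window holds exactly the values whose last occurrence is within k of the next index
def WinInv (k : Int) (pre : List Int) (visited : PySem.Dict Int Int) (window : PySem.Set Int) : Prop :=
  ∀ v, v ∈ window ↔ ∃ j, visited.get? v = some j ∧ (pre.length : Int) - 1 - j ≤ k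

-- no near-duplicate pair inside the processed prefix
def NoDup (k : Int) (pre : List Int) : Prop :=
  ∀ (a b : Nat) (_ : a < pre.length) (_ : b < pre.length), a < b → (b : Int) - a ≤ k → pre[a] ≠ pre[b]

lemma near_dup_main (nums : List Int) (k : Int) (hk : 1 ≤ k) :
    ∀ (l pre : List Int) (visited : PySem.Dict Int Int) (window : PySem.Set Int),
      nums = pre ++ l →
      VisInv pre visited → WinInv k pre visited window → NoDup k pre →
      near_dup_go k (PySem.List.enumerate l (pre.length : Int)) visited =
        near_dup_alt_go nums k (PySem.List.enumerate l (pre.length : Int)) window := by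
  intro l
  induction l with
  | nil => intro pre visited window _ _ _ _; simp [PySem.List.enumerate, near_dup_go, near_dup_alt_go]
  | cons x l ih =>
    intro pre visited window hsplit hvis hwin hnd
    rw [PySem.List.enumerate_cons]
    set s : Int := (pre.length : Int) with hs
    -- the post-eviction window contains v iff v's last occurrence j satisfies s - j ≤ k
    have hw1 : ∀ v, v ∈ pvEvict nums k s window ↔ ∃ j, visited.get? v = some j ∧ s - j ≤ k := by
      intro v
      unfold pvEvict
      by_cases hks : k < s
      · have he0 : (0:Int) ≤ s - k - 1 := by omega
        have henlt : (s - k - 1).toNat < pre.length := by omega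
        have hget : PySem.List.pyGet? nums (s - k - 1) = some pre[(s - k - 1).toNat] := by
          rw [PySem.List.pyGet?_of_nonneg _ he0, hsplit, List.getElem?_append_left henlt]
          simp
        rw [if_pos hks, hget, PySem.Set.mem_discard, hwin v]
        constructor
        · rintro ⟨⟨j, hj, hjk⟩, hne⟩
          refine ⟨j, hj, ?_⟩
          rcases (hvis v j).mp hj with ⟨jn, rfl, hlt, hpre, _⟩
          by_contra hcon
          have : jn = (s - k - 1).toNat := by omega
          subst this
          exact hne (hpre ▸ rfl)
        · rintro ⟨j, hj, hjk⟩
          rcases (hvis v j).mp hj with ⟨jn, rfl, hlt, hpre, hlast⟩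
          refine ⟨⟨(jn : Int), hj, by omega⟩, ?_⟩
          intro hveq
          exact hnd (s - k - 1).toNat jn henlt hlt (by omega) (by omega)
            (by rw [hpre, hveq])
      · rw [if_neg hks, hwin v]
        constructor
        · rintro ⟨j, hj, hjk⟩
          rcases (hvis v j).mp hj with ⟨jn, rfl, hlt, _, _⟩
          exact ⟨(jn : Int), hj, by omega⟩
        · rintro ⟨j, hj, hjk⟩
          rcases (hvis v j).mp hj with ⟨jn, rfl, hlt, _, _⟩
          exact ⟨(jn : Int), hj, by omega⟩
    -- if the test fails, one more step preserves all three invariants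
    have hstep :
        (¬ ∃ j, visited.get? x = some j ∧ s - j ≤ k) →
        near_dup_go k (PySem.List.enumerate l (s + 1)) (visited.insert x s) =
          near_dup_alt_go nums k (PySem.List.enumerate l (s + 1)) ((pvEvict nums k s window).add x) := by
      intro hnotest
      have hlen : ((pre ++ [x]).length : Int) = s + 1 := by simp [hs]
      have hvis' : VisInv (pre ++ [x]) (visited.insert x s) := by
        intro v j
        constructor
        · intro hj
          rcases eq_or_ne v x with rfl | hne
          · rw [PySem.Dict.get?_insert_self] at hj
            injection hj with hj
            refine ⟨pre.length, by omega, by simp, ?_, ?_⟩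
            · rw [List.getElem_append_right (le_refl _)]; simp
            · intro j' h' hgt; simp at h'; omega
          · rw [PySem.Dict.get?_insert_of_ne _ _ hne] at hj
            rcases (hvis v j).mp hj with ⟨jn, rfl, hlt, hpre, hlast⟩
            refine ⟨jn, rfl, by simp; omega, ?_, ?_⟩
            · rw [List.getElem_append_left hlt]; exact hpre
            · intro j' h' hgt
              simp at h'
              rcases Nat.lt_or_ge j' pre.length with h2 | h2
              · rw [List.getElem_append_left h2]; exact hlast j' h2 hgt
              · have : j' = pre.length := by omega
                subst this
                rw [List.getElem_append_right (le_refl _)]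
                simpa using hne.symm
        · rintro ⟨jn, rfl, hlt, hpre, hlast⟩
          simp at hlt
          rcases Nat.lt_or_ge jn pre.length with h2 | h2
          · rw [List.getElem_append_left h2] at hpre
            have hne : v ≠ x := by
              rintro rfl
              refine hlast pre.length (by simp) h2 ?_
              rw [List.getElem_append_right (le_refl _)]; simp
            rw [PySem.Dict.get?_insert_of_ne _ _ hne]
            refine (hvis v jn).mpr ⟨jn, rfl, h2, hpre, ?_⟩
            intro j' h' hgt
            have := hlast j' (by simp; omega) hgt
            rwa [List.getElem_append_left h'] at this
          · have : jn = pre.length := by omega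
            subst this
            rw [List.getElem_append_right (le_refl _)] at hpre
            simp at hpre
            subst hpre
            rw [PySem.Dict.get?_insert_self, hs]
      have hwin' : WinInv k (pre ++ [x]) (visited.insert x s) ((pvEvict nums k s window).add x) := by
        intro v
        rw [PySem.Set.mem_add, hw1 v]
        have hlen2 : ((pre ++ [x]).length : Int) - 1 = s := by simp [hs]
        rw [hlen2]
        constructor
        · rintro (⟨j, hj, hjk⟩ | rfl)
          · have hne : v ≠ x := by
              rintro rfl
              exact hnotest ⟨j, hj, hjk⟩
            exact ⟨j, by rw [PySem.Dict.get?_insert_of_ne _ _ hne]; exact hj, by omega⟩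
          · exact ⟨s, by rw [PySem.Dict.get?_insert_self], by omega⟩
        · rintro ⟨j, hj, hjk⟩
          rcases eq_or_ne v x with rfl | hne
          · right; rfl
          · rw [PySem.Dict.get?_insert_of_ne _ _ hne] at hj
            exact Or.inl ⟨j, hj, by omega⟩
      have hnd' : NoDup k (pre ++ [x]) := by
        intro a b ha hb hab hbk
        simp at ha hb
        rcases Nat.lt_or_ge b pre.length with h2 | h2
        · rw [List.getElem_append_left (by omega : a < pre.length), List.getElem_append_left h2]
          exact hnd a b (by omega) h2 hab hbk
        · have : b = pre.length := by omega
          subst this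
          rw [List.getElem_append_left (by omega : a < pre.length), List.getElem_append_right (le_refl _)]
          simp
          intro hax
          apply hnotest
          obtain ⟨jn, hjl, hjx, hjlast⟩ := exists_last_occ pre x (hax ▸ List.getElem_mem _)
          refine ⟨(jn : Int), (hvis x (jn : Int)).mpr ⟨jn, rfl, hjl, hjx, hjlast⟩, ?_⟩
          have : a ≤ jn := by
            by_contra hcon
            exact hjlast a (by omega) (by omega) hax
          omega
      have := ih (pre ++ [x]) (visited.insert x s) ((pvEvict nums k s window).add x)
        (by rw [hsplit, List.append_assoc]; rfl) hvis' hwin' hnd'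
      rw [hlen] at this
      exact this
    -- case split on A's test
    unfold near_dup_go near_dup_alt_go
    split
    · next j heq =>
      by_cases hjk : s - j ≤ k
      · rw [if_pos hjk]
        have : (pvEvict nums k s window).contains x = true := by
          rw [PySem.Set.contains_iff]
          exact (hw1 x).mpr ⟨j, heq, hjk⟩
        rw [this]
        simp
      · have hnot : ¬ ∃ j', visited.get? x = some j' ∧ s - j' ≤ k := by
          rintro ⟨j', hj', hk'⟩
          rw [heq] at hj'
          injection hj' with hj'
          exact hjk (hj' ▸ hk')
        have hB : (pvEvict nums k s window).contains x = false := by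
          apply (Bool.not_eq_true _).mp
          rw [PySem.Set.contains_iff]
          intro hmem
          exact hnot ((hw1 x).mp hmem)
        rw [if_neg hjk, hB]
        simp only [Bool.false_eq_true, if_false]
        exact hstep hnot
    · next heq =>
      have hnot : ¬ ∃ j, visited.get? x = some j ∧ s - j ≤ k := by
        rintro ⟨j, hj, _⟩
        rw [heq] at hj
        simp at hj
      have hB : (pvEvict nums k s window).contains x = false := by
        apply (Bool.not_eq_true _).mp
        rw [PySem.Set.contains_iff]
        intro hmem
        exact hnot ((hw1 x).mp hmem)
      rw [hB]
      simp only [Bool.false_eq_true, if_false]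
      exact hstep hnot

-- ===== VERDICT (by name: the statement is the Claim_ definition above) =====
theorem near_dup_spec : Claim_equal_near_dup := by
  intro nums k _
  unfold Spec_near_dup near_dup near_dup_alt
  by_cases hk : k < 1
  · rw [if_pos hk]
    exact near_dup_go_false_of_lt_one k hk nums 0 PySem.Dict.empty
      (by intro v j h; rw [PySem.Dict.get?_empty] at h; simp at h)
  · rw [if_neg hk]
    have := near_dup_main nums k (by omega) nums [] PySem.Dict.empty PySem.Set.empty rfl
      (by intro v j
          constructor
          · intro h; rw [PySem.Dict.get?_empty] at h; simp at h
          · rintro ⟨jn, _, h, _⟩; simp at h)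
      (by intro v
          constructor
          · intro h; simp [PySem.Set.empty] at h
          · rintro ⟨j, hj, _⟩; rw [PySem.Dict.get?_empty] at hj; simp at hj)
      (by intro a b ha _ _ _; simp at ha)
    simpa using this
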